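-- pv_equiv track=rewrite | github.com/krismutalapova/SkillSwap | core/tests/frontend_tests/test_template_css_integration.py | _is_non_semantic
-- ===== SOURCE A (Python) =====
-- def _is_non_semantic(class_name: str) -> bool:
--     presentational_keywords = [
--         "red",
--         "blue",
--         "green",
--         "big",
--         "small",
--         "left",
--         "right",
--         "bold",
--         "italic",
--         "underline",
--     ]
--
--     return any(keyword in class_name.lower() for keyword in presentational_keywords)
-- ===== SOURCE B (Python) =====
-- _KEYWORDS = ("red", "blue", "green", "big", "small", "left", "right",
--              "bold", "italic", "underline")
--
--
-- def _is_non_semantic(class_name: str) -> bool: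
--     # One left-to-right pass: at each position, does any keyword start here?
--     s = class_name.lower()
--     return any(s.startswith(_KEYWORDS, i) for i in range(len(s)))
-- ===== Notes on version B (the rewrite author's own statement) =====
-- stated objective: alternative
-- what changed: Replaced ten independent substring scans (any(keyword in s)) with a single left-to-right pass over the lowered string that at each position tests whether any keyword starts there (tuple form of str.startswith).
import Mathlib
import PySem

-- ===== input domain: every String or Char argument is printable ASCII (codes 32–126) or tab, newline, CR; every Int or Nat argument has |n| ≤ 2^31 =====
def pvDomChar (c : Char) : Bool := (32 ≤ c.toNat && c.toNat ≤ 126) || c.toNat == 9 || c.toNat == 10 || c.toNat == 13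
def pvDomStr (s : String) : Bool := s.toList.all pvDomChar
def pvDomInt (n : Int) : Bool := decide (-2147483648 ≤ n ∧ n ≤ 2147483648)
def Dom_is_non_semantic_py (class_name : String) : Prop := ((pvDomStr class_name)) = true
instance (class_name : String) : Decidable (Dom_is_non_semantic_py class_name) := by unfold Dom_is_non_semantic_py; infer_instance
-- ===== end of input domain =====

-- B changes the traversal: one pass over positions of the lowered string, checking keyword prefixes at each position, instead of ten separate substring scans; objective: alternative.

-- ===== PORT A =====
def pvKeywordsA : List String :=
  ["red", "blue", "green", "big", "small", "left", "right", "bold", "italic", "underline"]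

def is_non_semantic_py (class_name : String) : Bool :=
  pvKeywordsA.any (fun keyword => PySem.Str.isIn keyword (PySem.Str.lower class_name))

-- ===== PORT B =====
def pvKeywordsB : List (List Char) :=
  [['r','e','d'], ['b','l','u','e'], ['g','r','e','e','n'], ['b','i','g'],
   ['s','m','a','l','l'], ['l','e','f','t'], ['r','i','g','h','t'],
   ['b','o','l','d'], ['i','t','a','l','i','c'],
   ['u','n','d','e','r','l','i','n','e']]

-- the `any(... for i in range(len(s)))` pass: at each suffix, does some keyword start here?
def pvScan : List Char → Bool
  | [] => false
  | c :: t => pvKeywordsB.any (fun k => List.isPrefixOf k (c :: t)) || pvScan t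

def is_non_semantic_py_alt (class_name : String) : Bool :=
  pvScan (PySem.Chars.lower class_name.toList)

-- ===== PRECONDITION & SPEC =====
def Spec_is_non_semantic_py (class_name : String) (out : Bool) : Prop := out = is_non_semantic_py_alt class_name
instance (class_name : String) (out : Bool) : Decidable (Spec_is_non_semantic_py class_name out) := by unfold Spec_is_non_semantic_py; infer_instance

-- ===== CLAIM (what is proved, stated in full; the proofs are below) =====
def Claim_equal_is_non_semantic_py : Prop := ∀ (class_name : String), Dom_is_non_semantic_py class_name → Spec_is_non_semantic_py class_name (is_non_semantic_py class_name)

-- ===== LEMMAS AND PROOFS =====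

-- ===== VERDICT (by name: the statement is the Claim_ definition above) =====
lemma pvKeywordsB_ne_nil : ∀ k ∈ pvKeywordsB, k ≠ [] := by decide

lemma pvScan_iff (l : List Char) :
    pvScan l = true ↔ ∃ k ∈ pvKeywordsB, k <:+: l := by
  induction l with
  | nil =>
    simp only [pvScan, Bool.false_eq_true, false_iff, not_exists]
    rintro k ⟨hk, hinf⟩
    exact pvKeywordsB_ne_nil k hk (List.eq_nil_of_infix_nil hinf)
  | cons c t ih =>
    simp only [pvScan, Bool.or_eq_true, List.any_eq_true, ih]
    constructor
    · rintro (⟨k, hk, hp⟩ | ⟨k, hk, hi⟩)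
      · exact ⟨k, hk, (List.isPrefixOf_iff_prefix.mp hp).isInfix⟩
      · exact ⟨k, hk, hi.trans (t.suffix_cons c).isInfix⟩
    · rintro ⟨k, hk, hi⟩
      rcases List.infix_cons_iff.mp hi with hp | hi'
      · exact Or.inl ⟨k, hk, List.isPrefixOf_iff_prefix.mpr hp⟩
      · exact Or.inr ⟨k, hk, hi'⟩

lemma pvKeywordsB_eq : pvKeywordsB = pvKeywordsA.map String.toList := by decide

theorem is_non_semantic_py_spec : Claim_equal_is_non_semantic_py := by
  intro class_name _
  unfold Spec_is_non_semantic_py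
  unfold is_non_semantic_py is_non_semantic_py_alt
  apply Eq.symm
  rw [Bool.eq_iff_iff, pvScan_iff, pvKeywordsB_eq]
  simp only [List.any_eq_true, PySem.Str.isIn_eq, PySem.Str.toList_lower,
    PySem.Chars.isIn_iff_infix, List.mem_map]
  constructor
  · rintro ⟨k, ⟨s, hs, rfl⟩, hi⟩; exact ⟨s, hs, hi⟩
  · rintro ⟨s, hs, hi⟩; exact ⟨s.toList, ⟨s, hs, rfl⟩, hi⟩
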